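-- pv_equiv track=rewrite | github.com/werwty/misc | class/2020-privacy/HW1/hw1-files/bzhang28_HW1.py | compute_p
-- ===== SOURCE A (Python) =====
-- def compute_p(db, aux):
--     '''
--     Input: database of users
--     Returns weights of all movies
--     '''
--     #### ----- your code here ----- ####
--
--     ## you can use 10 base log
--
--     # dict with movie_id as key and frequency as value
--     movie_rating_range = {}
--     for user, movies in db.items():
--         for movie, rating in movies.items():
--             if movie not in movie_rating_range:
--                 movie_rating_range[movie] = set()
--             movie_rating_range[movie].add(rating)
--
--     movie_rating_p = {}
--     for movie, rating_range in movie_rating_range.items():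
--         aux_rating = aux.get(movie, None)
--         if aux_rating is not None:
--             rating_range.add(aux_rating)
--         movie_rating_p[movie] = (max(rating_range)- min(rating_range))
--
--     return movie_rating_p
-- ===== SOURCE B (Python) =====
-- def compute_p(db, aux):
--     '''
--     Input: database of users
--     Returns weights of all movies
--     '''
--     # One pass keeping a running (lo, hi) pair per movie instead of a set of
--     # distinct ratings; no final max/min scan over stored values is needed.
--     bounds = {}
--     for user, movies in db.items():
--         for movie, rating in movies.items():
--             if movie in bounds:
--                 lo, hi = bounds[movie]
--                 bounds[movie] = (min(lo, rating), max(hi, rating))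
--             else:
--                 bounds[movie] = (rating, rating)
--     result = {}
--     for movie, (lo, hi) in bounds.items():
--         a = aux.get(movie)
--         if a is not None:
--             lo, hi = min(lo, a), max(hi, a)
--         result[movie] = hi - lo
--     return result
-- ===== Notes on version B (the rewrite author's own statement) =====
-- stated objective: simpler
-- what changed: Replaces the per-movie set of distinct ratings plus a final max/min scan by a single running (lo, hi) pair per movie, updated in one pass and tightened once by the aux rating.
import Mathlib
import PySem

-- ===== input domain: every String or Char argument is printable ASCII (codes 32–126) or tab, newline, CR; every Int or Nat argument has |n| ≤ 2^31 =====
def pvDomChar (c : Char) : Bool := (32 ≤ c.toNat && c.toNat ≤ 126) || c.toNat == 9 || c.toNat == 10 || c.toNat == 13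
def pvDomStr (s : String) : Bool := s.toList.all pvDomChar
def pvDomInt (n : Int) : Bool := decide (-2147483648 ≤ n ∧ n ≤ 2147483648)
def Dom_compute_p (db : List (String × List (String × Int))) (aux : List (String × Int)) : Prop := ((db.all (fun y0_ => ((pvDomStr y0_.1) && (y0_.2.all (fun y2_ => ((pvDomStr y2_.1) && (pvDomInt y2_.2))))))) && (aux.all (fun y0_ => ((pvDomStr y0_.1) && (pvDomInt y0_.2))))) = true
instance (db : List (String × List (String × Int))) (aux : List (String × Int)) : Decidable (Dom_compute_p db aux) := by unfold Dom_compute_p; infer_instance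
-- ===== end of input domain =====

-- B replaces A's per-movie set of distinct ratings (finished by a max/min scan) with a
-- running (lo, hi) pair per movie updated in one pass; objective: simpler.

-- ===== PORT A =====
-- aux.get(movie, None) on the association list: first match (dict lookup).
def pvAuxGet (aux : List (String × Int)) (m : String) : Option Int :=
  (aux.find? (fun q => q.1 == m)).map (·.2)

def compute_p (db : List (String × List (String × Int))) (aux : List (String × Int)) : List (String × Int) :=
  -- first loop: movie_rating_range[movie] is a set of ratings
  let mrr : PySem.Dict String (PySem.Set Int) :=
    db.foldl (fun d p =>
      p.2.foldl (fun d q =>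
        let d1 := if d.contains q.1 then d else d.insert q.1 PySem.Set.empty
        d1.insert q.1 (PySem.Set.add (d1.getD q.1 PySem.Set.empty) q.2)) d)
      PySem.Dict.empty
  -- second loop: fold in aux rating, then max - min of the set (never empty here,
  -- so the .getD 0 defaults are never used)
  let mrp : PySem.Dict String Int :=
    mrr.items.foldl (fun out p =>
      let rr : PySem.Set Int :=
        match pvAuxGet aux p.1 with
        | some a => PySem.Set.add p.2 a
        | none => p.2
      out.insert p.1 (((PySem.List.max? rr (fun x => x)).getD 0) - ((PySem.List.min? rr (fun x => x)).getD 0)))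
      PySem.Dict.empty
  mrp.items

-- ===== PORT B =====
def compute_p_alt (db : List (String × List (String × Int))) (aux : List (String × Int)) : List (String × Int) :=
  let bounds : PySem.Dict String (Int × Int) :=
    db.foldl (fun d p =>
      p.2.foldl (fun d q =>
        match d.get? q.1 with
        | some lh => d.insert q.1 (min lh.1 q.2, max lh.2 q.2)
        | none => d.insert q.1 (q.2, q.2)) d)
      PySem.Dict.empty
  let result : PySem.Dict String Int :=
    bounds.items.foldl (fun out p =>
      let lh : Int × Int :=
        match pvAuxGet aux p.1 with
        | some a => (min p.2.1 a, max p.2.2 a)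
        | none => p.2
      out.insert p.1 (lh.2 - lh.1))
      PySem.Dict.empty
  result.items

-- ===== PRECONDITION & SPEC =====
def Spec_compute_p (db : List (String × List (String × Int))) (aux : List (String × Int)) (out : List (String × Int)) : Prop := out = compute_p_alt db aux
instance (db : List (String × List (String × Int))) (aux : List (String × Int)) (out : List (String × Int)) : Decidable (Spec_compute_p db aux out) := by unfold Spec_compute_p; infer_instance

-- ===== CLAIM (what is proved, stated in full; the proofs are below) =====
def Claim_equal_compute_p : Prop := ∀ (db : List (String × List (String × Int))) (aux : List (String × Int)), Dom_compute_p db aux → Spec_compute_p db aux (compute_p db aux)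

-- ===== LEMMAS AND PROOFS =====

-- relation between A's set-valued dict and B's (lo,hi)-valued dict
def pvRel (dA : PySem.Dict String (PySem.Set Int)) (dB : PySem.Dict String (Int × Int)) : Prop :=
  dA.keys = dB.keys ∧ dA.keys.Nodup ∧
  ∀ m S, dA.get? m = some S →
    S ≠ [] ∧ ∃ lo hi, dB.get? m = some (lo, hi) ∧
      PySem.List.min? S (fun x => x) = some lo ∧ PySem.List.max? S (fun x => x) = some hi

theorem pv_min_add (S : PySem.Set Int) (lo : Int) (hS : S ≠ [])
    (h : PySem.List.min? S (fun x => x) = some lo) (r : Int) :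
    PySem.List.min? (PySem.Set.add S r) (fun x => x) = some (min lo r) := by
  rw [PySem.Set.add_eq_ite]
  by_cases hr : r ∈ S
  · have := PySem.List.min?_isMin h r hr
    simp only [if_pos hr, h]
    congr 1
    omega
  · obtain ⟨x, t, rfl⟩ : ∃ x t, S = x :: t := by
      cases S with
      | nil => exact absurd rfl hS
      | cons x t => exact ⟨x, t, rfl⟩
    have hcons : PySem.List.min? (x :: t) (fun x => x) = some (t.foldl min x) :=
      PySem.List.min?_id_cons x t
    rw [hcons] at h
    simp only [if_neg hr, List.cons_append, PySem.List.min?_id_cons, List.foldl_append]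
    simp [← Option.some_inj.mp h]

theorem pv_max_add (S : PySem.Set Int) (hi : Int) (hS : S ≠ [])
    (h : PySem.List.max? S (fun x => x) = some hi) (r : Int) :
    PySem.List.max? (PySem.Set.add S r) (fun x => x) = some (max hi r) := by
  rw [PySem.Set.add_eq_ite]
  by_cases hr : r ∈ S
  · have := PySem.List.max?_isMax h r hr
    simp only [if_pos hr, h]
    congr 1
    omega
  · obtain ⟨x, t, rfl⟩ : ∃ x t, S = x :: t := by
      cases S with
      | nil => exact absurd rfl hS
      | cons x t => exact ⟨x, t, rfl⟩
    have hcons : PySem.List.max? (x :: t) (fun x => x) = some (t.foldl max x) :=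
      PySem.List.max?_id_cons x t
    rw [hcons] at h
    simp only [if_neg hr, List.cons_append, PySem.List.max?_id_cons, List.foldl_append]
    simp [← Option.some_inj.mp h]

theorem pv_step (dA : PySem.Dict String (PySem.Set Int)) (dB : PySem.Dict String (Int × Int))
    (q : String × Int) (h : pvRel dA dB) :
    pvRel
      (let d1 := if dA.contains q.1 then dA else dA.insert q.1 PySem.Set.empty
       d1.insert q.1 (PySem.Set.add (d1.getD q.1 PySem.Set.empty) q.2))
      (match dB.get? q.1 with
       | some lh => dB.insert q.1 (min lh.1 q.2, max lh.2 q.2)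
       | none => dB.insert q.1 (q.2, q.2)) := by
  obtain ⟨hk, hnd, hv⟩ := h
  obtain ⟨m, r⟩ := q
  cases hA : dA.get? m with
  | some S =>
    obtain ⟨hSne, lo, hi, hB, hmin, hmax⟩ := hv m S hA
    have hcA : dA.contains m = true := by
      rw [PySem.Dict.contains_eq_isSome_get?, hA]; rfl
    have hgD : dA.getD m PySem.Set.empty = S := by simp [PySem.Dict.getD_eq_get?_getD, hA]
    simp only [hcA, if_true, hB, hgD]
    refine ⟨?_, ?_, ?_⟩
    · rw [PySem.Dict.keys_insert_of_contains _ _ hcA,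
        PySem.Dict.keys_insert_of_contains _ _ (by rw [PySem.Dict.contains_eq_isSome_get?, hB]; rfl), hk]
    · rw [PySem.Dict.keys_insert_of_contains _ _ hcA]; exact hnd
    · intro m' S' hget
      rw [PySem.Dict.get?_insert] at hget
      by_cases hm : m' = m
      · subst hm
        rw [if_pos rfl] at hget
        obtain rfl : PySem.Set.add S r = S' := Option.some_inj.mp hget
        refine ⟨?_, min lo r, max hi r, ?_, pv_min_add S lo hSne hmin r, pv_max_add S hi hSne hmax r⟩
        · rw [PySem.Set.add_eq_ite]; split <;> simp [hSne]
        · rw [PySem.Dict.get?_insert, if_pos rfl]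
      · rw [if_neg hm] at hget
        obtain ⟨h1, lo', hi', h2, h3, h4⟩ := hv m' S' hget
        exact ⟨h1, lo', hi', by rw [PySem.Dict.get?_insert, if_neg hm]; exact h2, h3, h4⟩
  | none =>
    have hcA : dA.contains m = false := by
      rw [PySem.Dict.contains_eq_isSome_get?, hA]; rfl
    have hmemA : m ∉ dA.keys := by
      rw [← PySem.Dict.get?_eq_none_iff_not_mem_keys, hA]
    have hB : dB.get? m = none := by
      rw [PySem.Dict.get?_eq_none_iff_not_mem_keys, ← hk]; exact hmemA
    have hcB : dB.contains m = false := by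
      rw [PySem.Dict.contains_eq_isSome_get?, hB]; rfl
    have hgD : (dA.insert m PySem.Set.empty).getD m PySem.Set.empty = PySem.Set.empty :=
      PySem.Dict.getD_insert_self _ _ _ _
    simp only [hcA, Bool.false_eq_true, if_false, hB]
    rw [hgD]
    have hadd : PySem.Set.add (PySem.Set.empty : PySem.Set Int) r = [r] := rfl
    rw [hadd, PySem.Dict.insert_insert_self]
    refine ⟨?_, ?_, ?_⟩
    · rw [PySem.Dict.keys_insert_of_not_contains _ _ hcA,
        PySem.Dict.keys_insert_of_not_contains _ _ hcB, hk]
    · rw [PySem.Dict.keys_insert_of_not_contains _ _ hcA]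
      rw [List.nodup_append]
      refine ⟨hnd, List.nodup_singleton m, ?_⟩
      intro a ha b hb
      rw [List.mem_singleton] at hb
      subst hb
      exact fun he => hmemA (he ▸ ha)
    · intro m' S' hget
      rw [PySem.Dict.get?_insert] at hget
      by_cases hm : m' = m
      · subst hm
        rw [if_pos rfl] at hget
        obtain rfl : [r] = S' := Option.some_inj.mp hget
        refine ⟨by simp, r, r, by rw [PySem.Dict.get?_insert, if_pos rfl], ?_, ?_⟩
        · exact PySem.List.min?_id_cons r []
        · exact PySem.List.max?_id_cons r []
      · rw [if_neg hm] at hget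
        obtain ⟨h1, lo', hi', h2, h3, h4⟩ := hv m' S' hget
        exact ⟨h1, lo', hi', by rw [PySem.Dict.get?_insert, if_neg hm]; exact h2, h3, h4⟩

theorem pv_foldl_rel {α : Type} (f : PySem.Dict String (PySem.Set Int) → α → PySem.Dict String (PySem.Set Int))
    (g : PySem.Dict String (Int × Int) → α → PySem.Dict String (Int × Int))
    (hstep : ∀ d d' a, pvRel d d' → pvRel (f d a) (g d' a))
    (l : List α) (d : PySem.Dict String (PySem.Set Int)) (d' : PySem.Dict String (Int × Int))
    (h : pvRel d d') : pvRel (l.foldl f d) (l.foldl g d') := by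
  induction l generalizing d d' with
  | nil => exact h
  | cons a t ih => exact ih _ _ (hstep _ _ _ h)

theorem pv_rel_phase1 (db : List (String × List (String × Int))) :
    pvRel
      (db.foldl (fun d p =>
        p.2.foldl (fun d q =>
          let d1 := if d.contains q.1 then d else d.insert q.1 PySem.Set.empty
          d1.insert q.1 (PySem.Set.add (d1.getD q.1 PySem.Set.empty) q.2)) d)
        PySem.Dict.empty)
      (db.foldl (fun d p =>
        p.2.foldl (fun d q =>
          match d.get? q.1 with
          | some lh => d.insert q.1 (min lh.1 q.2, max lh.2 q.2)
          | none => d.insert q.1 (q.2, q.2)) d)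
        PySem.Dict.empty) := by
  refine pv_foldl_rel _ _ (fun d d' p h => pv_foldl_rel _ _ (fun d d' q h => pv_step d d' q h) p.2 d d' h) db _ _ ?_
  refine ⟨rfl, List.nodup_nil, ?_⟩
  intro m S hget
  rw [PySem.Dict.get?_empty] at hget
  exact absurd hget (by simp)

theorem pv_items_fold {α : Type} (l : List (String × α)) (v : (String × α) → Int)
    (hnd : (l.map Prod.fst).Nodup) :
    (l.foldl (fun out p => out.insert p.1 (v p)) (PySem.Dict.empty : PySem.Dict String Int)).items
      = l.map (fun p => (p.1, v p)) := by
  have h := PySem.Dict.items_foldl_insert_fresh (l := l) (k := Prod.fst) (v := v)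
    (d := (PySem.Dict.empty : PySem.Dict String Int))
    (by intro a _; exact PySem.Dict.contains_empty _) hnd
  simpa using h

theorem pv_phase2 (aux : List (String × Int))
    (dA : PySem.Dict String (PySem.Set Int)) (dB : PySem.Dict String (Int × Int))
    (h : pvRel dA dB) :
    (dA.items.foldl (fun out p =>
        let rr : PySem.Set Int :=
          match pvAuxGet aux p.1 with
          | some a => PySem.Set.add p.2 a
          | none => p.2
        out.insert p.1 (((PySem.List.max? rr (fun x => x)).getD 0) - ((PySem.List.min? rr (fun x => x)).getD 0)))
        PySem.Dict.empty).items
    = (dB.items.foldl (fun out p =>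
        let lh : Int × Int :=
          match pvAuxGet aux p.1 with
          | some a => (min p.2.1 a, max p.2.2 a)
          | none => p.2
        out.insert p.1 (lh.2 - lh.1))
        PySem.Dict.empty).items := by
  obtain ⟨hk, hnd, hv⟩ := h
  have hndB : dB.keys.Nodup := hk ▸ hnd
  rw [pv_items_fold _ _ (by simpa using hnd), pv_items_fold _ _ (by simpa using hndB)]
  rw [PySem.Dict.items_eq_map_keys dA hnd PySem.Set.empty,
      PySem.Dict.items_eq_map_keys dB hndB (0, 0), ← hk]
  rw [List.map_map, List.map_map]
  apply List.map_congr_left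
  intro m hm
  obtain ⟨S, hS⟩ : ∃ S, dA.get? m = some S := by
    cases hA : dA.get? m with
    | some S => exact ⟨S, rfl⟩
    | none => exact absurd hm (by
        have := hA
        rw [PySem.Dict.get?_eq_none_iff_not_mem_keys] at this
        exact this)
  obtain ⟨hSne, lo, hi, hB, hmin, hmax⟩ := hv m S hS
  have hgA : dA.getD m PySem.Set.empty = S := by simp [PySem.Dict.getD_eq_get?_getD, hS]
  have hgB : dB.getD m (0, 0) = (lo, hi) := by simp [PySem.Dict.getD_eq_get?_getD, hB]
  simp only [Function.comp, hgA, hgB]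
  cases pvAuxGet aux m with
  | some a =>
    rw [pv_min_add S lo hSne hmin a, pv_max_add S hi hSne hmax a]
    rfl
  | none =>
    simp only [hmin, hmax]
    rfl

-- ===== VERDICT (by name: the statement is the Claim_ definition above) =====
theorem compute_p_spec : Claim_equal_compute_p := by
  intro db aux _
  unfold Spec_compute_p compute_p compute_p_alt
  exact pv_phase2 aux _ _ (pv_rel_phase1 db)
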